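-- pv_equiv track=rewrite | github.com/weshinsley/advent-of-code | 2015/python/d20.py | solve
-- ===== SOURCE A (Python) =====
-- def solve(target, per_house, max_presents):
--     houses = (target // per_house) + 1
--     presents = [0] * houses
--     for elf in range(1, houses):
--         n = 0
--         h = elf
--         while (n < max_presents) and (h < houses):
--             presents[h] += (per_house * elf)
--             n += 1
--             h += elf
--     for x in range(1, houses):
--         if presents[x] >= target:
--             return x
-- ===== SOURCE B (Python) =====
-- def solve(target, per_house, max_presents):
--     # Per-house restricted divisor sum by sqrt trial division; no presents array.
--     houses = (target // per_house) + 1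
--     for x in range(1, houses):
--         s = 0
--         d = 1
--         while d * d <= x:
--             if x % d == 0:
--                 if x // d <= max_presents:
--                     s += d
--                 e = x // d
--                 if e != d and x // e <= max_presents:
--                     s += e
--             d += 1
--         if per_house * s >= target:
--             return x
-- ===== Notes on version B (the rewrite author's own statement) =====
-- stated objective: alternative
-- what changed: Replaces the elf sieve over a shared presents array with an independent per-house restricted divisor sum computed by sqrt trial division (counting a divisor e only when the co-divisor x//e is at most max_presents), dropping the O(houses) array entirely.
import Mathlib
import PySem

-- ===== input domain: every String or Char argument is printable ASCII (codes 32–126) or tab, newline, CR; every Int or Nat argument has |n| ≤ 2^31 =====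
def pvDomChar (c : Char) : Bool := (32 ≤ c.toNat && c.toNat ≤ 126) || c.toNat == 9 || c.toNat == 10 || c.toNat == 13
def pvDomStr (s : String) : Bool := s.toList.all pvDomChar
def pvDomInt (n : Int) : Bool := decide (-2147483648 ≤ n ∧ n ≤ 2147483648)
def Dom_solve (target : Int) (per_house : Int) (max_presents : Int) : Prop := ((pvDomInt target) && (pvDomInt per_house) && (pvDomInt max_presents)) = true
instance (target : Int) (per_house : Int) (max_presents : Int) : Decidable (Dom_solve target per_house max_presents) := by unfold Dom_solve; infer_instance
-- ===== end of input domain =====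

-- B replaces A's elf sieve over a shared presents array by an independent per-house
-- restricted divisor sum via sqrt trial division (an alternative algorithm; same return value).


-- ===== PORT A =====
-- the inner while loop: 'while (n < max_presents) and (h < houses): presents[h] += per_house*elf; n += 1; h += elf'
-- (whenever the write happens the index h satisfies 1 <= h < houses = len(presents),
-- so setIfInBounds/getD are exact for Python's presents[h])
def innerLoop (per_house houses max_presents elf : Int) (n h : Int) (pr : Array Int) : Array Int :=
  if n < max_presents ∧ h < houses then
    innerLoop per_house houses max_presents elf (n + 1) (h + elf)
      (pr.setIfInBounds h.toNat (pr.getD h.toNat 0 + per_house * elf))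
  else pr
termination_by (max_presents - n).toNat
decreasing_by omega

def solve (target : Int) (per_house : Int) (max_presents : Int) : Option Int :=
  let houses := PySem.Int.floordiv target per_house + 1
  let presents : Array Int := Array.replicate houses.toNat 0
  let presents := (PySem.List.pyRange 1 houses 1).foldl
      (fun pr elf => innerLoop per_house houses max_presents elf 0 elf pr) presents
  (PySem.List.pyRange 1 houses 1).find? (fun x => decide (target ≤ presents.getD x.toNat 0))

-- ===== PORT B =====
-- 'while d*d <= x: if x % d == 0: ...; d += 1' accumulating the divisor sum s
def divSumLoop (x max_presents : Int) (d s : Int) : Int :=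
  if d * d ≤ x then
    divSumLoop x max_presents (d + 1)
      (if PySem.Int.mod x d = 0 then
        let s1 := if PySem.Int.floordiv x d ≤ max_presents then s + d else s
        let e := PySem.Int.floordiv x d
        if e ≠ d ∧ PySem.Int.floordiv x e ≤ max_presents then s1 + e else s1
      else s)
  else s
termination_by (x + 1 - d).toNat
decreasing_by
  have hd : d ≤ x := by
    rcases Int.lt_or_le d 1 with h1 | h1
    · nlinarith [mul_self_nonneg d]
    · nlinarith
  omega

def solve_alt (target : Int) (per_house : Int) (max_presents : Int) : Option Int :=
  let houses := PySem.Int.floordiv target per_house + 1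
  (PySem.List.pyRange 1 houses 1).find?
    (fun x => decide (target ≤ per_house * divSumLoop x max_presents 1 0))

-- ===== PRECONDITION & SPEC =====
-- Pre_ excludes only per_house = 0, on which Python's 'target // per_house' raises ZeroDivisionError
-- (B's Python raises there too).
def Pre_solve (target : Int) (per_house : Int) (max_presents : Int) : Prop := per_house ≠ 0
instance (target : Int) (per_house : Int) (max_presents : Int) : Decidable (Pre_solve target per_house max_presents) := by unfold Pre_solve; infer_instance
def pvWitness_solve : Int × Int × Int := (10, 1, 3)

def Spec_solve (target : Int) (per_house : Int) (max_presents : Int) (out : Option Int) : Prop := out = solve_alt target per_house max_presents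
instance (target : Int) (per_house : Int) (max_presents : Int) (out : Option Int) : Decidable (Spec_solve target per_house max_presents out) := by unfold Spec_solve; infer_instance

-- ===== CLAIM (what is proved, stated in full; the proofs are below) =====
def Claim_equal_solve : Prop := ∀ (target : Int) (per_house : Int) (max_presents : Int), Dom_solve target per_house max_presents → Pre_solve target per_house max_presents → Spec_solve target per_house max_presents (solve target per_house max_presents)

-- ===== LEMMAS AND PROOFS =====
-- Both ports are shown to compute, for each house x with 1 ≤ x < houses, the value
-- per_house * (sum of the divisors e of x whose co-divisor is at most max_presents),
-- written as the Finset sum  ∑ e ∈ Icc 1 x, if e ∣ x ∧ x ≤ max_presents * e then e else 0.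

lemma getD_setIfInBounds (a : Array Int) (i j : Nat) (v : Int) :
    (a.setIfInBounds i v).getD j 0 = if i = j ∧ j < a.size then v else a.getD j 0 := by
  unfold Array.getD
  by_cases hij : i = j
  · subst hij
    by_cases hb : i < a.size
    · simp [hb]
    · simp [hb]
  · by_cases hb : j < a.size
    · simp [hb, hij]
    · simp [hb, hij]

lemma innerLoop_getD (per houses mp elf : Int) (helf : 1 ≤ elf) (x : Int)
    (hx1 : 1 ≤ x) (hx : x < houses) (n h : Int) (hh : 1 ≤ h)
    (pr : Array Int) (hsz : pr.size = houses.toNat) :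
    (innerLoop per houses mp elf n h pr).getD x.toNat 0
      = pr.getD x.toNat 0
        + (if h ≤ x ∧ elf ∣ (x - h) ∧ x - h < elf * (mp - n) then per * elf else 0) := by
  revert hh hsz
  fun_induction innerLoop per houses mp elf n h pr with
  | case1 n h pr hg ih =>
    intro hh hsz
    have hh' : (1:Int) ≤ h + elf := by omega
    have hsz' : (pr.setIfInBounds h.toNat (pr.getD h.toNat 0 + per * elf)).size = houses.toNat := by
      simpa using hsz
    rw [ih hh' hsz']
    rw [getD_setIfInBounds]
    by_cases hxh : x = h
    · subst hxh
      have hc1 : x.toNat = x.toNat ∧ x.toNat < pr.size := by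
        constructor
        · rfl
        · omega
      rw [if_pos hc1]
      have hcond : x ≤ x ∧ elf ∣ (x - x) ∧ x - x < elf * (mp - n) := by
        refine ⟨le_refl x, by simp, ?_⟩
        have : 0 < elf * (mp - n) := mul_pos (by omega) (by omega)
        omega
      rw [if_pos hcond]
      have hnot : ¬ (x + elf ≤ x ∧ elf ∣ (x - (x + elf)) ∧ x - (x + elf) < elf * (mp - (n + 1))) := by
        rintro ⟨h1, -, -⟩; omega
      rw [if_neg hnot]
      ring
    · have hc1 : ¬ (h.toNat = x.toNat ∧ x.toNat < pr.size) := by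
        rintro ⟨h1, -⟩
        have : x = h := by omega
        exact hxh this
      rw [if_neg hc1]
      have hiff : (h + elf ≤ x ∧ elf ∣ (x - (h + elf)) ∧ x - (h + elf) < elf * (mp - (n + 1)))
          ↔ (h ≤ x ∧ elf ∣ (x - h) ∧ x - h < elf * (mp - n)) := by
        constructor
        · rintro ⟨h1, ⟨k, hk⟩, h3⟩
          refine ⟨by omega, ⟨k + 1, by linarith [hk, mul_add elf k 1]⟩, ?_⟩
          have he : elf * (mp - (n + 1)) + elf = elf * (mp - n) := by ring
          omega
        · rintro ⟨h1, ⟨k, hk⟩, h3⟩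
          have hxgt : 1 ≤ x - h := by
            rcases Int.lt_or_le h x with hlt | hle
            · omega
            · omega
          have hk1 : 1 ≤ k := by nlinarith
          refine ⟨by nlinarith, ⟨k - 1, by linarith [mul_sub elf k 1]⟩, ?_⟩
          have he : elf * (mp - (n + 1)) + elf = elf * (mp - n) := by ring
          omega
      rw [if_congr hiff rfl rfl]
  | case2 n h pr hg =>
    intro hh hsz
    push Not at hg
    have : ¬ (h ≤ x ∧ elf ∣ (x - h) ∧ x - h < elf * (mp - n)) := by
      rintro ⟨h1, -, h3⟩
      rcases Int.lt_or_le n mp with hn | hn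
      · have := hg hn; omega
      · have : elf * (mp - n) ≤ 0 := by nlinarith
        omega
    rw [if_neg this]
    ring

lemma innerLoop_size (per_house houses max_presents elf n h : Int) (pr : Array Int) :
    (innerLoop per_house houses max_presents elf n h pr).size = pr.size := by
  fun_induction innerLoop with
  | case1 n h pr hg ih => rw [ih]; simp
  | case2 n h pr hg => rfl

lemma fold_getD (per mp houses : Int) (L : List Int) (hL : ∀ e ∈ L, 1 ≤ e)
    (x : Int) (hx1 : 1 ≤ x) (hx : x < houses)
    (pr : Array Int) (hsz : pr.size = houses.toNat) :
    ((L.foldl (fun pr elf => innerLoop per houses mp elf 0 elf pr) pr).getD x.toNat 0)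
      = pr.getD x.toNat 0
        + (L.map (fun elf =>
            if elf ≤ x ∧ elf ∣ (x - elf) ∧ x - elf < elf * mp then per * elf else 0)).sum := by
  induction L generalizing pr with
  | nil => simp
  | cons e L ih =>
    have he : (1:Int) ≤ e := hL e (by simp)
    have hL' : ∀ e ∈ L, (1:Int) ≤ e := fun a ha => hL a (by simp [ha])
    rw [List.foldl_cons, ih hL' _ (by rw [innerLoop_size]; exact hsz)]
    rw [innerLoop_getD per houses mp e he x hx1 hx 0 e he pr hsz]
    rw [List.map_cons, List.sum_cons]
    have : mp - 0 = mp := by ring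
    rw [this]
    ring

lemma Icc_succ_right_int (a b : Int) (h : a ≤ b + 1) :
    Finset.Icc a (b + 1) = insert (b + 1) (Finset.Icc a b) := by
  ext e
  simp only [Finset.mem_Icc, Finset.mem_insert]
  omega

lemma sum_pyRange_map (b : Int) (f : Int → Int) :
    ((PySem.List.pyRange 1 b 1).map f).sum = ∑ e ∈ Finset.Icc 1 (b - 1), f e := by
  have H : ∀ n : Nat, ∀ b : Int, (b - 1).toNat = n →
      ((PySem.List.pyRange 1 b 1).map f).sum = ∑ e ∈ Finset.Icc 1 (b - 1), f e := by
    intro n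
    induction n with
    | zero =>
      intro b hb
      rw [PySem.List.pyRange_one_eq_nil (by omega), Finset.Icc_eq_empty (by omega)]
      simp
    | succ k ih =>
      intro b hb
      have h1 : (1:Int) ≤ b - 1 := by omega
      have hsplit : PySem.List.pyRange 1 b 1 = PySem.List.pyRange 1 (b-1) 1 ++ [b-1] := by
        have := PySem.List.pyRange_one_succ_right (a := (1:Int)) (b := b - 1) (by omega)
        have hb1 : b - 1 + 1 = b := by ring
        rw [hb1] at this
        exact this
      rw [hsplit, List.map_append, List.sum_append, ih (b-1) (by omega)]
      have hins : Finset.Icc (1:Int) (b-1) = insert (b-1) (Finset.Icc 1 (b-1-1)) := by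
        have := Icc_succ_right_int 1 (b-1-1) (by omega)
        have hb2 : b - 1 - 1 + 1 = b - 1 := by ring
        rw [hb2] at this
        exact this
      rw [hins, Finset.sum_insert (by simp)]
      simp
      ring
  exact H _ b rfl

lemma find?_congr_mem (L : List Int) (p q : Int → Bool) (h : ∀ x ∈ L, p x = q x) :
    L.find? p = L.find? q := by
  induction L with
  | nil => rfl
  | cons a L ih =>
    have ha := h a (by simp)
    rw [List.find?_cons, List.find?_cons, ha]
    by_cases hq : q a = true
    · simp [hq]
    · simp only [Bool.not_eq_true] at hq
      simp [hq]
      exact ih (fun x hx => h x (by simp [hx]))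

lemma sieve_sum_eq (per mp houses x : Int) (hx1 : 1 ≤ x) (hx : x < houses) :
    ((PySem.List.pyRange 1 houses 1).map (fun elf =>
        if elf ≤ x ∧ elf ∣ (x - elf) ∧ x - elf < elf * mp then per * elf else 0)).sum
      = per * ∑ e ∈ Finset.Icc 1 x, (if e ∣ x ∧ x ≤ mp * e then e else 0) := by
  rw [sum_pyRange_map]
  rw [Finset.mul_sum]
  have hsub : Finset.Icc (1:Int) x ⊆ Finset.Icc 1 (houses - 1) := by
    intro e he
    simp only [Finset.mem_Icc] at he ⊢
    omega
  rw [← Finset.sum_subset hsub]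
  · apply Finset.sum_congr rfl
    intro e he
    simp only [Finset.mem_Icc] at he
    have hepos : (0:Int) < e := by omega
    rw [mul_ite, mul_zero]
    apply if_congr _ rfl rfl
    constructor
    · rintro ⟨h1, ⟨k, hk⟩, h3⟩
      have hdvd : e ∣ x := ⟨k + 1, by linarith [mul_add e k 1]⟩
      refine ⟨hdvd, ?_⟩
      -- x - e < e * mp with x = e*(k+1): k+1 ≤ mp hence x ≤ mp * e
      have hx_eq : x = e * (k + 1) := by linarith [mul_add e k 1]
      have hk_lt : k < mp := by nlinarith
      nlinarith
    · rintro ⟨⟨k, hk⟩, h2⟩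
      have hkpos : 1 ≤ k := by nlinarith
      refine ⟨by nlinarith, ⟨k - 1, by linarith [mul_sub e k 1]⟩, ?_⟩
      -- x ≤ mp*e, x = e*k ⇒ k ≤ mp ⇒ x - e = e*(k-1) < e*mp
      have hkle : k ≤ mp := by nlinarith
      nlinarith
  · intro e he hne
    simp only [Finset.mem_Icc] at he hne
    rw [if_neg]
    rintro ⟨h1, -, -⟩
    omega

lemma divSumLoop_filter_empty (mp x d : Int) (hd : 1 ≤ d) (hg : ¬ d * d ≤ x) :
    (Finset.Icc 1 x).filter (fun e => e ∣ x ∧ x ≤ mp * e ∧ d ≤ e ∧ d * e ≤ x) = ∅ := by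
  rw [Finset.filter_eq_empty_iff]
  rintro e he ⟨-, -, hde, hdex⟩
  simp only [Finset.mem_Icc] at he
  nlinarith

lemma divSumLoop_inv (mp x : Int) (hx : 1 ≤ x) (d s : Int) (hd : 1 ≤ d) :
    divSumLoop x mp d s
      = s + ∑ e ∈ (Finset.Icc 1 x).filter
              (fun e => e ∣ x ∧ x ≤ mp * e ∧ d ≤ e ∧ d * e ≤ x), e := by
  have H : ∀ N : Nat, ∀ d s : Int, 1 ≤ d → (x + 1 - d).toNat ≤ N →
      divSumLoop x mp d s
        = s + ∑ e ∈ (Finset.Icc 1 x).filter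
                (fun e => e ∣ x ∧ x ≤ mp * e ∧ d ≤ e ∧ d * e ≤ x), e := by
    intro N
    induction N with
    | zero =>
      intro d s hd hN
      have hxd : x < d := by omega
      have hgf : ¬ (d * d ≤ x) := by nlinarith
      rw [divSumLoop, if_neg hgf, divSumLoop_filter_empty mp x d hd hgf]
      simp
    | succ N ih =>
      intro d s hd hN
      by_cases hg : d * d ≤ x
      · have hdx : d ≤ x := by nlinarith
        rw [divSumLoop, if_pos hg, ih (d + 1) _ (by omega) (by omega)]
        have hdpos : (0:Int) < d := by omega
        have hco : ∀ e : Int, 1 ≤ e → e ∣ x → d ≤ e → d * e ≤ x → ¬ ((d + 1) * e ≤ x) →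
            x = e * d := by
          rintro e he ⟨k, hk⟩ hde hdex hne
          have hepos : (0:Int) < e := by omega
          have hk1 : d ≤ k := by
            have : e * d ≤ e * k := by nlinarith
            exact le_of_mul_le_mul_left this hepos
          have hk2 : k < d + 1 := by
            have : e * k < e * (d + 1) := by nlinarith
            exact lt_of_mul_lt_mul_left this (by omega)
          have : k = d := by omega
          rw [hk, this]
        have hsub : (Finset.Icc 1 x).filter
              (fun e => e ∣ x ∧ x ≤ mp * e ∧ d + 1 ≤ e ∧ (d + 1) * e ≤ x)
            ⊆ (Finset.Icc 1 x).filter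
              (fun e => e ∣ x ∧ x ≤ mp * e ∧ d ≤ e ∧ d * e ≤ x) := by
          intro e he
          simp only [Finset.mem_filter, Finset.mem_Icc] at he ⊢
          obtain ⟨⟨he1, he2⟩, hdv, hc, hde, hdex⟩ := he
          exact ⟨⟨he1, he2⟩, hdv, hc, by omega, by nlinarith⟩
        have hsdiff := Finset.sum_sdiff (f := fun e => e) hsub
        by_cases hdvd : PySem.Int.mod x d = 0
        · have hdvd' : d ∣ x := (PySem.Int.mod_eq_zero_iff_dvd x d).mp hdvd
          obtain ⟨q, hq⟩ := hdvd'
          have hq1 : (1:Int) ≤ q := by nlinarith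
          have hqpos : (0:Int) < q := by omega
          have hdq : d ≤ q := by
            have : d * d ≤ d * q := by rw [← hq]; exact hg
            exact le_of_mul_le_mul_left this hdpos
          have hqx : q ≤ x := by nlinarith
          have hfd : PySem.Int.floordiv x d = q := by
            rw [PySem.Int.floordiv_eq_ediv_of_pos hdpos, hq,
              Int.mul_ediv_cancel_left q (by omega)]
          have hfq : PySem.Int.floordiv x q = d := by
            rw [PySem.Int.floordiv_eq_ediv_of_pos hqpos, hq, mul_comm d q,
              Int.mul_ediv_cancel_left d (by omega)]
          rw [if_pos hdvd]
          dsimp only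
          rw [hfd, hfq]
          have hcond_d : (x ≤ mp * d) ↔ q ≤ mp := by
            constructor
            · intro h; nlinarith
            · intro h; nlinarith
          have hcond_q : (x ≤ mp * q) ↔ d ≤ mp := by
            constructor
            · intro h; nlinarith
            · intro h; nlinarith
          have hkey : ∀ e : Int,
              e ∈ (Finset.Icc 1 x).filter
                    (fun e => e ∣ x ∧ x ≤ mp * e ∧ d ≤ e ∧ d * e ≤ x) \
                  (Finset.Icc 1 x).filter
                    (fun e => e ∣ x ∧ x ≤ mp * e ∧ d + 1 ≤ e ∧ (d + 1) * e ≤ x)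
                ↔ ((e = d ∨ e = q) ∧ x ≤ mp * e) := by
            intro e
            simp only [Finset.mem_sdiff, Finset.mem_filter, Finset.mem_Icc]
            constructor
            · rintro ⟨⟨⟨he1, he2⟩, hdv, hc, hde, hdex⟩, hnot⟩
              refine ⟨?_, hc⟩
              by_cases hed : e = d
              · exact Or.inl hed
              · have hd1e : d + 1 ≤ e := by omega
                have hnle : ¬ ((d + 1) * e ≤ x) := by
                  intro hle
                  exact hnot ⟨⟨he1, he2⟩, hdv, hc, hd1e, hle⟩
                have hxe : x = e * d := hco e he1 hdv hde hdex hnle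
                right
                have : d * e = d * q := by rw [mul_comm d e, ← hxe, hq]
                exact mul_left_cancel₀ (by omega) this
            · rintro ⟨hdq', hc⟩
              rcases hdq' with he | he
              · refine ⟨⟨⟨by rw [he]; omega, by rw [he]; omega⟩,
                  by rw [he]; exact ⟨q, hq⟩, hc, by rw [he], by rw [he]; exact hg⟩, ?_⟩
                rintro ⟨-, -, -, hge, -⟩
                omega
              · refine ⟨⟨⟨by rw [he]; omega, by rw [he]; omega⟩,
                  by rw [he]; exact ⟨d, by rw [hq]; ring⟩, hc, by rw [he]; exact hdq,
                  by rw [he]; nlinarith [hq]⟩, ?_⟩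
                rintro ⟨-, -, -, -, hle⟩
                rw [he] at hle
                nlinarith
          have hDelta :
              ∑ e ∈ (Finset.Icc 1 x).filter
                    (fun e => e ∣ x ∧ x ≤ mp * e ∧ d ≤ e ∧ d * e ≤ x) \
                  (Finset.Icc 1 x).filter
                    (fun e => e ∣ x ∧ x ≤ mp * e ∧ d + 1 ≤ e ∧ (d + 1) * e ≤ x), e
                = (if q ≤ mp then d else 0) + (if q ≠ d ∧ d ≤ mp then q else 0) := by
            have hset : (Finset.Icc 1 x).filter
                    (fun e => e ∣ x ∧ x ≤ mp * e ∧ d ≤ e ∧ d * e ≤ x) \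
                  (Finset.Icc 1 x).filter
                    (fun e => e ∣ x ∧ x ≤ mp * e ∧ d + 1 ≤ e ∧ (d + 1) * e ≤ x)
                = ({d, q} : Finset Int).filter (fun e => x ≤ mp * e) := by
              ext e
              rw [hkey e]
              simp only [Finset.mem_filter, Finset.mem_insert, Finset.mem_singleton]
            rw [hset, Finset.sum_filter]
            by_cases hqd : q = d
            · subst hqd
              rw [show ({q, q} : Finset Int) = {q} by simp, Finset.sum_singleton,
                if_congr hcond_d rfl rfl,
                if_neg (show ¬ (q ≠ q ∧ q ≤ mp) by tauto), add_zero]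
            · rw [Finset.sum_pair (show d ≠ q by omega),
                if_congr hcond_d rfl rfl, if_congr hcond_q rfl rfl,
                if_congr (show (q ≠ d ∧ d ≤ mp) ↔ d ≤ mp by tauto) rfl rfl]
          rw [← hsdiff, hDelta]
          split_ifs <;> linarith
        · have hndvd : ¬ d ∣ x :=
            fun hdd => hdvd ((PySem.Int.mod_eq_zero_iff_dvd x d).mpr hdd)
          rw [if_neg hdvd]
          have hset : (Finset.Icc 1 x).filter
                (fun e => e ∣ x ∧ x ≤ mp * e ∧ d ≤ e ∧ d * e ≤ x)
              = (Finset.Icc 1 x).filter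
                (fun e => e ∣ x ∧ x ≤ mp * e ∧ d + 1 ≤ e ∧ (d + 1) * e ≤ x) := by
            ext e
            simp only [Finset.mem_filter, Finset.mem_Icc]
            constructor
            · rintro ⟨⟨he1, he2⟩, hdv, hc, hde, hdex⟩
              have hed : e ≠ d := by
                rintro rfl
                exact hndvd hdv
              have hd1e : d + 1 ≤ e := by omega
              have hle : (d + 1) * e ≤ x := by
                by_contra hnle
                have hxe : x = e * d := hco e he1 hdv hde hdex hnle
                exact hndvd ⟨e, by rw [hxe]; ring⟩
              exact ⟨⟨he1, he2⟩, hdv, hc, hd1e, hle⟩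
            · rintro ⟨⟨he1, he2⟩, hdv, hc, hde, hdex⟩
              exact ⟨⟨he1, he2⟩, hdv, hc, by omega, by nlinarith⟩
          rw [hset]
      · rw [divSumLoop, if_neg hg, divSumLoop_filter_empty mp x d hd hg]
        simp
  exact H ((x + 1 - d).toNat) d s hd (le_refl _)

lemma divSumLoop_eq (mp x : Int) (hx : 1 ≤ x) :
    divSumLoop x mp 1 0 = ∑ e ∈ Finset.Icc 1 x, (if e ∣ x ∧ x ≤ mp * e then e else 0) := by
  rw [divSumLoop_inv mp x hx 1 0 (le_refl 1), zero_add, Finset.sum_filter]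
  apply Finset.sum_congr rfl
  intro e he
  simp only [Finset.mem_Icc] at he
  apply if_congr _ rfl rfl
  constructor
  · rintro ⟨h1, h2, -, -⟩
    exact ⟨h1, h2⟩
  · rintro ⟨h1, h2⟩
    exact ⟨h1, h2, he.1, by omega⟩

-- ===== VERDICT (by name: the statement is the Claim_ definition above) =====
theorem solve_spec : Claim_equal_solve := by
  intro target per_house max_presents _hdom _hpre
  unfold Spec_solve solve solve_alt
  apply find?_congr_mem
  intro x hx
  rw [PySem.List.mem_pyRange_one] at hx
  obtain ⟨hx1, hxlt⟩ := hx
  congr 1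
  have hsz : (Array.replicate (PySem.Int.floordiv target per_house + 1).toNat (0:Int)).size
      = (PySem.Int.floordiv target per_house + 1).toNat := by simp
  rw [fold_getD per_house max_presents (PySem.Int.floordiv target per_house + 1)
    (PySem.List.pyRange 1 (PySem.Int.floordiv target per_house + 1) 1)
    (fun e he => (PySem.List.mem_pyRange_one.mp he).1) x hx1 hxlt _ hsz]
  have hzero : (Array.replicate (PySem.Int.floordiv target per_house + 1).toNat (0:Int)).getD x.toNat 0 = 0 := by
    unfold Array.getD
    split <;> simp
  rw [hzero, zero_add, sieve_sum_eq per_house max_presents _ x hx1 hxlt,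
    divSumLoop_eq max_presents x hx1]
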